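-- pv_equiv track=rewrite | github.com/Roarain/tornado-game | decorators/check.py | get_hand_cards_total_cout_status
-- ===== SOURCE A (Python) =====
-- card_to_number_dict = {'A': 11, '2': 2, '3': 3, '4': 4, '5': 5, '6': 6, '7': 7, '8': 8, '9': 9, '10': 10, 'J': 10, 'Q': 10, 'K': 10}
--
-- def get_hand_cards_total_cout_status(hand_cards):
--     """
--
--     :param hand_cards:
--     :return:tuple hand_cards_total_count, hand_cards_status
--     """
--     countA = hand_cards.count('A')
--     cards = [hand_card for hand_card in hand_cards if not hand_card == 'A']
--     chc = sum([card_to_number_dict[card] for card in cards])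
--     if countA:
--         A_count = 11 * 1 + (countA - 1) * 1
--         if chc + A_count > 21:
--             A_count = countA * 1
--     else:
--         A_count = 0
--     hand_cards_total_count = chc + A_count
--
--     if hand_cards_total_count > 21:
--         hand_cards_status = 'BOOM'
--     elif hand_cards_total_count == 21:
--         hand_cards_status = 'BLACKJACK'
--     elif 0 < hand_cards_total_count < 21:
--         hand_cards_status = 'NORMAL'
--     else:
--         hand_cards_status = 'Unknown'
--
--     return hand_cards_total_count, hand_cards_status
-- ===== SOURCE B (Python) =====
-- card_to_number_dict = {'A': 11, '2': 2, '3': 3, '4': 4, '5': 5, '6': 6, '7': 7, '8': 8, '9': 9, '10': 10, 'J': 10, 'Q': 10, 'K': 10}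
--
-- def get_hand_cards_total_cout_status(hand_cards):
--     # single pass: value every ace as 1, count aces, then upgrade one ace to 11 if it fits
--     total = 0
--     aces = 0
--     for card in hand_cards:
--         if card == 'A':
--             total += 1
--             aces += 1
--         else:
--             total += card_to_number_dict[card]
--     if aces > 0 and total + 10 <= 21:
--         total += 10
--     if total > 21:
--         status = 'BOOM'
--     elif total == 21:
--         status = 'BLACKJACK'
--     elif 0 < total < 21:
--         status = 'NORMAL'
--     else:
--         status = 'Unknown'
--     return total, status
-- ===== Notes on version B (the rewrite author's own statement) =====
-- stated objective: simpler
-- what changed: Replaced A's count('A') plus non-ace filter list plus summed lookup comprehension plus A_count reassignment with one accumulating loop (aces valued 1, ace counter) followed by a single conditional +10 soft-ace upgrade.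
import Mathlib
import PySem

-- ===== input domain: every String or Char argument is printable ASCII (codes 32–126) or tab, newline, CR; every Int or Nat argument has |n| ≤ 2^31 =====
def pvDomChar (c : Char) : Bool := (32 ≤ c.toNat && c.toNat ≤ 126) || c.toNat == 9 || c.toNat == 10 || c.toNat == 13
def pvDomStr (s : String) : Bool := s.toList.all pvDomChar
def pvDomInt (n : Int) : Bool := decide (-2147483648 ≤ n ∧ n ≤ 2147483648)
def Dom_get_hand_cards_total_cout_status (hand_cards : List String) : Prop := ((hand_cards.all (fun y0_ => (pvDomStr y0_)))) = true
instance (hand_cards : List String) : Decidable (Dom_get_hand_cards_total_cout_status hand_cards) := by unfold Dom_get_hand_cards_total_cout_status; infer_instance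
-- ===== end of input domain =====

-- B is a simpler one-pass re-decomposition: accumulate the total with every ace worth 1
-- while counting aces, then add 10 once if an ace can be soft. Same return value as A on Pre_.

-- ===== PORT A =====
def cardToNumberDict : PySem.Dict String Int :=
  PySem.Dict.ofList [("A", 11), ("2", 2), ("3", 3), ("4", 4), ("5", 5), ("6", 6),
    ("7", 7), ("8", 8), ("9", 9), ("10", 10), ("J", 10), ("Q", 10), ("K", 10)]

def get_hand_cards_total_cout_status (hand_cards : List String) : Int × String :=
  let countA : Int := PySem.List.count hand_cards "A"
  let cards : List String := hand_cards.filter (fun hand_card => !(hand_card == "A"))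
  -- card_to_number_dict[card]: KeyError on an unknown card; Pre_ excludes those inputs
  let chc : Int := (cards.map (fun card => PySem.Dict.getD cardToNumberDict card 0)).sum
  let A_count : Int :=
    if countA ≠ 0 then
      let a0 : Int := 11 * 1 + (countA - 1) * 1
      if chc + a0 > 21 then countA * 1 else a0
    else 0
  let hand_cards_total_count : Int := chc + A_count
  let hand_cards_status : String :=
    if hand_cards_total_count > 21 then "BOOM"
    else if hand_cards_total_count == 21 then "BLACKJACK"
    else if 0 < hand_cards_total_count ∧ hand_cards_total_count < 21 then "NORMAL"
    else "Unknown"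
  (hand_cards_total_count, hand_cards_status)

-- ===== PORT B =====
def get_hand_cards_total_cout_status_alt (hand_cards : List String) : Int × String :=
  let acc : Int × Int := hand_cards.foldl
    (fun (s : Int × Int) card =>
      if card == "A" then (s.1 + 1, s.2 + 1)
      else (s.1 + PySem.Dict.getD cardToNumberDict card 0, s.2)) (0, 0)
  let total : Int := if acc.2 > 0 ∧ acc.1 + 10 ≤ 21 then acc.1 + 10 else acc.1
  let status : String :=
    if total > 21 then "BOOM"
    else if total == 21 then "BLACKJACK"
    else if 0 < total ∧ total < 21 then "NORMAL"
    else "Unknown"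
  (total, status)

-- ===== PRECONDITION & SPEC =====
-- Pre_ excludes exactly the inputs where Python A raises KeyError: a card not in card_to_number_dict.
def Pre_get_hand_cards_total_cout_status (hand_cards : List String) : Prop :=
  ∀ c ∈ hand_cards, c ∈ ["A", "2", "3", "4", "5", "6", "7", "8", "9", "10", "J", "Q", "K"]
instance (hand_cards : List String) : Decidable (Pre_get_hand_cards_total_cout_status hand_cards) := by
  unfold Pre_get_hand_cards_total_cout_status; infer_instance

def pvWitness_get_hand_cards_total_cout_status : List String := ["A", "K", "3"]

def Spec_get_hand_cards_total_cout_status (hand_cards : List String) (out : Int × String) : Prop := out = get_hand_cards_total_cout_status_alt hand_cards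
instance (hand_cards : List String) (out : Int × String) : Decidable (Spec_get_hand_cards_total_cout_status hand_cards out) := by unfold Spec_get_hand_cards_total_cout_status; infer_instance

-- ===== CLAIM (what is proved, stated in full; the proofs are below) =====
def Claim_equal_get_hand_cards_total_cout_status : Prop := ∀ (hand_cards : List String), Dom_get_hand_cards_total_cout_status hand_cards → Pre_get_hand_cards_total_cout_status hand_cards → Spec_get_hand_cards_total_cout_status hand_cards (get_hand_cards_total_cout_status hand_cards)

-- ===== LEMMAS AND PROOFS =====

-- B's single fold equals (aces-as-1 total, ace count) expressed with A's quantities.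
theorem foldB_spec (hand_cards : List String) (t a : Int) :
    hand_cards.foldl
      (fun (s : Int × Int) card =>
        if card == "A" then (s.1 + 1, s.2 + 1)
        else (s.1 + PySem.Dict.getD cardToNumberDict card 0, s.2)) (t, a)
    = (t + ((hand_cards.filter (fun c => !(c == "A"))).map
              (fun card => PySem.Dict.getD cardToNumberDict card 0)).sum
          + (PySem.List.count hand_cards "A" : Int),
       a + (PySem.List.count hand_cards "A" : Int)) := by
  induction hand_cards generalizing t a with
  | nil => simp [PySem.List.count]
  | cons x xs ih =>
    simp only [List.foldl_cons]
    by_cases hx : x = "A"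
    · subst hx
      rw [if_pos (by simp), ih]
      simp [PySem.List.count]
      omega
    · rw [if_neg (by simp [hx]), ih]
      simp [PySem.List.count, hx]
      omega

theorem count_nonneg' (xs : List String) (v : String) : (0 : Int) ≤ PySem.List.count xs v := by
  simp [PySem.List.count]

-- ===== VERDICT (by name: the statement is the Claim_ definition above) =====
theorem get_hand_cards_total_cout_status_spec : Claim_equal_get_hand_cards_total_cout_status := by
  intro hand_cards _ _
  unfold Spec_get_hand_cards_total_cout_status
  simp only [get_hand_cards_total_cout_status, get_hand_cards_total_cout_status_alt]
  rw [foldB_spec]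
  have hA : (0 : Int) ≤ PySem.List.count hand_cards "A" := count_nonneg' hand_cards "A"
  set cA : Int := (PySem.List.count hand_cards "A" : Int) with hcA
  set chc : Int := ((hand_cards.filter (fun c => !(c == "A"))).map
      (fun card => PySem.Dict.getD cardToNumberDict card 0)).sum with hchc
  have ht : chc + (if cA ≠ 0 then
        (if chc + (11 * 1 + (cA - 1) * 1) > 21 then cA * 1 else 11 * 1 + (cA - 1) * 1)
      else 0)
      = (if 0 + cA > 0 ∧ 0 + chc + cA + 10 ≤ 21 then 0 + chc + cA + 10 else 0 + chc + cA) := by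
    split_ifs <;> omega
  rw [ht]
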